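-- pv_equiv track=rewrite | github.com/rossfreedman/rally | app/services/lineup_escrow_service.py | _blur_lineup
-- ===== SOURCE A (Python) =====
-- def _blur_lineup(lineup_text: str) -> str:
--     """Blur lineup text for privacy"""
--     lines = lineup_text.split('\n')
--     blurred_lines = []
--
--     for line in lines:
--         if line.strip():
--             # Replace most characters with asterisks, keep some structure
--             blurred_line = ""
--             for char in line:
--                 if char.isalpha():
--                     blurred_line += "*"
--                 elif char.isdigit():
--                     blurred_line += "#"
--                 else:
--                     blurred_line += char
--             blurred_lines.append(blurred_line)
--         else:
--             blurred_lines.append(line)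
--
--     return '\n'.join(blurred_lines)
-- ===== SOURCE B (Python) =====
-- def _blur_lineup(lineup_text: str) -> str:
--     """Blur lineup text for privacy.
--
--     Splitting into lines is unnecessary: '\n' is neither alphabetic nor a
--     digit, so it maps to itself, and a whitespace-only line is unchanged by
--     the per-character mapping anyway.  One flat pass over the whole string.
--     """
--     return ''.join(
--         '*' if c.isalpha() else '#' if c.isdigit() else c
--         for c in lineup_text
--     )
-- ===== Notes on version B (the rewrite author's own statement) =====
-- stated objective: simpler
-- what changed: Dropped the split-into-lines/per-line-loop/join pipeline and the redundant strip() branch for a single flat per-character pass over the whole string (newline maps to itself and whitespace-only lines are fixed points of the mapping).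
import Mathlib
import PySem

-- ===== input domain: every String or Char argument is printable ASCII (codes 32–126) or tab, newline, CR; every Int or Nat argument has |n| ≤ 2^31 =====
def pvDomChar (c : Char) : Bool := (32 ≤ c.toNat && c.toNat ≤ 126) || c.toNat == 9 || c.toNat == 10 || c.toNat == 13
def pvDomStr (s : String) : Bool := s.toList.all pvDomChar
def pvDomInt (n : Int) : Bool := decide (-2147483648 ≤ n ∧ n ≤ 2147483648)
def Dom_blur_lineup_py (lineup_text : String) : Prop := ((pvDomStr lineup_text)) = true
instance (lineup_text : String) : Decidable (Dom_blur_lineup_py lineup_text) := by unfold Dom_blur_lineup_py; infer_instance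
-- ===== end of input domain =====

-- B collapses A's split-lines / per-line loop / join pipeline into one flat per-character pass (objective: simpler).


-- ===== PORT A =====
-- A's inner 'for char in line' loop building blurred_line by concatenation
def pvBlurLineA (line : List Char) : List Char :=
  line.foldl (fun acc c =>
    acc ++ [if PySem.Chars.isalpha c then '*'
            else if PySem.Chars.isdigit c then '#' else c]) []

def blur_lineup_py (lineup_text : String) : String :=
  let lines := PySem.Chars.splitOn lineup_text.toList ['\n']
  let blurred_lines := lines.foldl (fun acc line =>
    if PySem.Chars.strip line ≠ [] then acc ++ [pvBlurLineA line]
    else acc ++ [line]) []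
  String.ofList (PySem.Chars.join ['\n'] blurred_lines)

-- ===== PORT B =====
def pvBlurChar (c : Char) : Char :=
  if PySem.Chars.isalpha c then '*'
  else if PySem.Chars.isdigit c then '#' else c

def blur_lineup_py_alt (lineup_text : String) : String :=
  String.ofList (lineup_text.toList.map pvBlurChar)

-- ===== PRECONDITION & SPEC =====
def Spec_blur_lineup_py (lineup_text : String) (out : String) : Prop := out = blur_lineup_py_alt lineup_text
instance (lineup_text : String) (out : String) : Decidable (Spec_blur_lineup_py lineup_text out) := by unfold Spec_blur_lineup_py; infer_instance

-- ===== CLAIM (what is proved, stated in full; the proofs are below) =====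
def Claim_equal_blur_lineup_py : Prop := ∀ (lineup_text : String), Dom_blur_lineup_py lineup_text → Spec_blur_lineup_py lineup_text (blur_lineup_py lineup_text)

-- ===== LEMMAS AND PROOFS =====

-- A's inner concatenation loop is a map over the line
lemma pvBlurLineA_eq_map (l : List Char) : pvBlurLineA l = l.map pvBlurChar := by
  unfold pvBlurLineA pvBlurChar
  suffices h : ∀ (l acc : List Char),
      l.foldl (fun acc c =>
        acc ++ [if PySem.Chars.isalpha c then '*'
                else if PySem.Chars.isdigit c then '#' else c]) acc
      = acc ++ l.map (fun c => if PySem.Chars.isalpha c then '*'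
                else if PySem.Chars.isdigit c then '#' else c) by
    simpa using h l []
  intro l
  induction l with
  | nil => simp
  | cons c t ih => intro acc; simp [List.foldl_cons, ih]

-- a whitespace character is neither alphabetic nor a digit, so the mapping fixes it
lemma pvBlurChar_of_isspace {c : Char} (h : PySem.Chars.isspace c = true) :
    pvBlurChar c = c := by
  unfold pvBlurChar
  simp only [PySem.Chars.isspace, Char.toNat] at h
  have hd : PySem.Chars.isdigit c = false := by
    simp [PySem.Chars.isdigit, Char.le_def, UInt32.le_iff_toNat_le] at *
    omega
  have ha : PySem.Chars.isalpha c = false := by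
    simp [PySem.Chars.isalpha, PySem.Chars.isupper, PySem.Chars.islower,
          Char.le_def, UInt32.le_iff_toNat_le] at *
    omega
  simp [ha, hd]

-- a line whose strip() is empty consists of whitespace only
lemma pvStrip_nil_all_space {l : List Char} (h : PySem.Chars.strip l = []) :
    ∀ c ∈ l, PySem.Chars.isspace c = true := by
  intro c hc
  unfold PySem.Chars.strip PySem.Chars.rstrip PySem.Chars.lstrip at h
  have h2 : ∀ d ∈ List.dropWhile PySem.Chars.isspace l, PySem.Chars.isspace d = true := by
    intro d hd
    have h' := List.reverse_eq_nil_iff.mp h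
    have := List.dropWhile_eq_nil_iff.mp (by simpa using h')
    exact this d (by simpa using hd)
  rcases List.mem_append.mp
      (by rw [List.takeWhile_append_dropWhile]; exact hc :
        c ∈ List.takeWhile PySem.Chars.isspace l ++ List.dropWhile PySem.Chars.isspace l) with h1 | h1
  · exact List.mem_takeWhile_imp h1
  · exact h2 c h1

-- PySem's fuelled splitter with a single-char separator is Mathlib's List.splitOn
lemma pvGo_eq (nl : Char) :
    ∀ (l : List Char) (fuel : Nat) (cur : List Char) (acc : List (List Char)),
    l.length ≤ fuel → (∀ c ∈ cur, c ≠ nl) →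
    PySem.Chars.splitOn.go [nl] fuel l cur acc
      = acc.reverse ++ List.splitOn nl (cur.reverse ++ l) := by
  intro l
  induction l with
  | nil =>
    intro fuel cur acc _ hcur
    have hs : List.splitOn nl cur.reverse = [cur.reverse] := by
      apply List.splitOnP_eq_single
      intro x hx
      simpa using fun h => hcur x (by simpa using hx) (by simpa using h)
    cases fuel with
    | zero => simp only [PySem.Chars.splitOn.go]; simp [hs]
    | succ fu => simp [PySem.Chars.splitOn.go, hs]
  | cons ch rest ih =>
    intro fuel cur acc hlen hcur
    cases fuel with
    | zero => simp at hlen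
    | succ fu =>
      rw [PySem.Chars.splitOn.go]
      by_cases h : nl = ch
      · subst h
        have hpre : List.isPrefixOf [nl] (nl :: rest) = true := by simp [List.isPrefixOf]
        rw [if_pos hpre]
        have := ih fu [] (cur.reverse :: acc) (by simpa using Nat.le_of_succ_le_succ hlen) (by simp)
        simp only [List.length_singleton] at *
        rw [show List.drop 1 (nl :: rest) = rest from rfl, this]
        have hfirst : List.splitOn nl (cur.reverse ++ nl :: rest)
            = cur.reverse :: List.splitOn nl rest := by
          apply List.splitOnP_first
          · intro x hx; simpa using fun h => hcur x (by simpa using hx) (by simpa using h)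
          · simp
        simp [hfirst]
      · have hpre : List.isPrefixOf [nl] (ch :: rest) = false := by
          simp [List.isPrefixOf]; exact h
        rw [if_neg (by simp [hpre])]
        have := ih fu (ch :: cur) acc (Nat.le_of_succ_le_succ hlen)
          (by intro c hc; rcases List.mem_cons.mp hc with h1 | h1
              · subst h1; exact fun hh => h hh.symm
              · exact hcur c h1)
        rw [this]
        simp

lemma pvSplitOn_eq (nl : Char) (s : List Char) :
    PySem.Chars.splitOn s [nl] = List.splitOn nl s := by
  unfold PySem.Chars.splitOn
  simpa using pvGo_eq nl s (s.length + 1) [] [] (by omega) (by simp)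

-- intercalate commutes with a character map that fixes the separator
lemma pvIntercalate_map (f : Char → Char) (nl : Char) (hf : f nl = nl) :
    ∀ parts : List (List Char),
    [nl].intercalate (parts.map (List.map f)) = List.map f ([nl].intercalate parts) := by
  intro parts
  induction parts with
  | nil => simp [List.intercalate]
  | cons a t ih =>
    cases t with
    | nil => simp [List.intercalate]
    | cons b t' =>
      simp only [List.map_cons]
      rw [show [nl].intercalate (List.map f a :: List.map f b :: List.map (List.map f) t')
            = List.map f a ++ [nl] ++ [nl].intercalate (List.map f b :: List.map (List.map f) t') from by
          simp [List.intercalate, List.intersperse]]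
      rw [show [nl].intercalate (a :: b :: t') = a ++ [nl] ++ [nl].intercalate (b :: t') from by
          simp [List.intercalate, List.intersperse]]
      simp only [List.map_cons] at ih ⊢
      simp [ih, hf]

-- both branches of A's outer loop append the mapped line, so the loop is a map
lemma pvOuter_eq_map (lines : List (List Char)) :
    lines.foldl (fun acc line =>
      if PySem.Chars.strip line ≠ [] then acc ++ [pvBlurLineA line]
      else acc ++ [line]) []
    = lines.map (List.map pvBlurChar) := by
  suffices h : ∀ (lines : List (List Char)) (acc : List (List Char)),
      lines.foldl (fun acc line =>
        if PySem.Chars.strip line ≠ [] then acc ++ [pvBlurLineA line]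
        else acc ++ [line]) acc
      = acc ++ lines.map (List.map pvBlurChar) by
    simpa using h lines []
  intro lines
  induction lines with
  | nil => simp
  | cons l t ih =>
    intro acc
    simp only [List.foldl_cons]
    by_cases hl : PySem.Chars.strip l = []
    · have hfix : List.map pvBlurChar l = l := by
        have := List.map_congr_left
          (fun c hc => pvBlurChar_of_isspace (pvStrip_nil_all_space hl c hc) :
            ∀ c ∈ l, pvBlurChar c = id c)
        simpa using this
      rw [if_neg (not_not_intro hl), ih]
      simp [hfix]
    · rw [if_pos hl, ih, pvBlurLineA_eq_map]
      simp

-- ===== VERDICT (by name: the statement is the Claim_ definition above) =====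
theorem blur_lineup_py_spec : Claim_equal_blur_lineup_py := by
  intro s _
  show blur_lineup_py s = blur_lineup_py_alt s
  unfold blur_lineup_py blur_lineup_py_alt
  simp only [pvSplitOn_eq, pvOuter_eq_map, PySem.Chars.join,
      pvIntercalate_map pvBlurChar '\n' (by decide),
      List.intercalate_splitOn]
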